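-- pv_equiv track=rewrite | github.com/tam-sal/python_practice_assessments | Module_2_Assessment.py | check_nums
-- ===== SOURCE A (Python) =====
-- def check_nums(my_list):
--     final_list = []
--     my_list_len = len(my_list)
--     idx = 0
--     while idx < my_list_len and my_list[idx] != 7:
--         final_list.append(my_list[idx])
--         idx += 1
--     return final_list
-- ===== SOURCE B (Python) =====
-- def check_nums(my_list):
--     lst = list(my_list)
--     if 7 in lst:
--         return lst[:lst.index(7)]
--     return lst
-- ===== Notes on version B (the rewrite author's own statement) =====
-- stated objective: simpler
-- what changed: Replaces A's element-by-element while-loop accumulation with a find-the-first-7-then-bulk-slice decomposition (membership test + index + slice).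
import Mathlib
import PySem

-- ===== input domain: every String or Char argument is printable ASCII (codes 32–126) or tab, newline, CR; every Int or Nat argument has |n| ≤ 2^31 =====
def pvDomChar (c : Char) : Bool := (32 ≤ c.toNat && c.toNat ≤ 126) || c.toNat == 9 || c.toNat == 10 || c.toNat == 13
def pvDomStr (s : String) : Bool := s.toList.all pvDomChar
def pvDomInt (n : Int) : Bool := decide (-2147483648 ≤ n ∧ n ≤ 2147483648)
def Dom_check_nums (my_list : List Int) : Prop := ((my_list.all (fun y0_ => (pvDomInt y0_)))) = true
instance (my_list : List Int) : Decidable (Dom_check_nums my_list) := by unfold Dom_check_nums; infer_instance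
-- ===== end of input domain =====

-- B replaces A's element-by-element while-loop with a find-first-7-then-slice decomposition (simpler).


-- ===== PORT A =====
-- while idx < len(my_list) and my_list[idx] != 7: final_list.append(my_list[idx]); idx += 1
def checkNumsLoop (my_list final_list : List Int) (idx : Nat) : List Int :=
  if _h : idx < my_list.length ∧ PySem.List.pyGetD my_list (idx : Int) 0 ≠ 7 then
    checkNumsLoop my_list (final_list ++ [PySem.List.pyGetD my_list (idx : Int) 0]) (idx + 1)
  else final_list
termination_by my_list.length - idx

def check_nums (my_list : List Int) : List Int :=
  checkNumsLoop my_list [] 0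

-- ===== PORT B =====
-- lst = list(my_list); if 7 in lst: return lst[:lst.index(7)]; return lst
def check_nums_alt (my_list : List Int) : List Int :=
  if (7 : Int) ∈ my_list then
    match PySem.List.index? my_list (7 : Int) with
    | some k => PySem.List.slice my_list none (some (k : Int))
    | none => my_list
  else my_list

-- ===== PRECONDITION & SPEC =====
def Spec_check_nums (my_list : List Int) (out : List Int) : Prop := out = check_nums_alt my_list
instance (my_list : List Int) (out : List Int) : Decidable (Spec_check_nums my_list out) := by unfold Spec_check_nums; infer_instance

-- ===== CLAIM (what is proved, stated in full; the proofs are below) =====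
def Claim_equal_check_nums : Prop := ∀ (my_list : List Int), Dom_check_nums my_list → Spec_check_nums my_list (check_nums my_list)

-- ===== LEMMAS AND PROOFS =====

-- B computes takeWhile (· ≠ 7)
lemma alt_eq_takeWhile (l : List Int) : check_nums_alt l = l.takeWhile (fun x => x ≠ 7) := by
  induction l with
  | nil => simp [check_nums_alt]
  | cons x t ih =>
    by_cases hx : x = 7
    · subst hx
      rw [check_nums_alt, if_pos (List.mem_cons_self), PySem.List.index?_cons_self 7 t]
      show PySem.List.slice (7 :: t) none (some ((0 : Nat) : Int)) = _
      rw [PySem.List.slice_to_natCast (7 :: t) 0]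
      simp [List.takeWhile]
    · by_cases h7 : (7 : Int) ∈ t
      · obtain ⟨k, hk⟩ := Option.isSome_iff_exists.mp ((PySem.List.index?_isSome_iff t 7).mpr h7)
        rw [check_nums_alt, if_pos (List.mem_cons_of_mem x h7),
          PySem.List.index?_cons_of_ne t hx, hk]
        simp only [Option.map_some]
        show PySem.List.slice (x :: t) none (some ((k + 1 : Nat) : Int)) = _
        rw [PySem.List.slice_to_natCast (x :: t) (k + 1)]
        have ih' : List.take k t = List.takeWhile (fun x => decide (x ≠ 7)) t := by
          rw [← PySem.List.slice_to_natCast t k]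
          rw [check_nums_alt, if_pos h7, hk] at ih
          exact ih
        rw [List.take_succ_cons, List.takeWhile_cons_of_pos (by simp [hx]), ih']
      · have hmem : (7 : Int) ∉ x :: t := by simp [Ne.symm hx, h7]
        rw [check_nums_alt, if_neg hmem]
        rw [check_nums_alt, if_neg h7] at ih
        rw [List.takeWhile_cons_of_pos (by simp [hx]), ← ih]

-- A's loop appends takeWhile of the remaining suffix
lemma loop_eq (l : List Int) (idx : Nat) (acc : List Int) (h : idx ≤ l.length) :
    checkNumsLoop l acc idx = acc ++ (l.drop idx).takeWhile (fun x => x ≠ 7) := by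
  induction hn : l.length - idx generalizing idx acc with
  | zero =>
    have : idx = l.length := by omega
    rw [checkNumsLoop, dif_neg (by omega)]
    simp [this]
  | succ n ih =>
    have hlt : idx < l.length := by omega
    have hget : PySem.List.pyGetD l (idx : Int) 0 = l[idx] := by
      rw [PySem.List.pyGetD_natCast]
      simp [hlt]
    have hdrop : l.drop idx = l[idx] :: l.drop (idx + 1) := List.drop_eq_getElem_cons hlt
    by_cases h7 : l[idx] = 7
    · rw [checkNumsLoop, dif_neg (by rw [hget]; tauto)]
      rw [hdrop]
      simp [List.takeWhile, h7]
    · rw [checkNumsLoop, dif_pos ⟨hlt, by rw [hget]; exact h7⟩]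
      rw [ih (idx + 1) _ (by omega) (by omega), hget, hdrop]
      simp [List.takeWhile, h7]

-- ===== VERDICT (by name: the statement is the Claim_ definition above) =====
theorem check_nums_spec : Claim_equal_check_nums := by
  intro l _
  unfold Spec_check_nums check_nums
  rw [loop_eq l 0 [] (Nat.zero_le _), alt_eq_takeWhile]
  simp
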